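-- pv_equiv track=rewrite | github.com/justjacobrosario/BS_Computer_Science_UPD_Repo | 1st Year 1st Sem/python test drive/useful_dictionaries/dict_grouping.py | group_by_modulo
-- ===== SOURCE A (Python) =====
-- def group_by_modulo(seq, x):
--     dic = {}
--     for num in seq:
--         mod = num % x
--         if mod in dic:
--             (dic[mod]).append(num)
--         else:
--             dic.update({mod : [num]})
--     return dic
-- ===== SOURCE B (Python) =====
-- def group_by_modulo(seq, x):
--     keys = list(dict.fromkeys(num % x for num in seq))
--     return {mod: [num for num in seq if num % x == mod] for mod in keys}
-- ===== Notes on version B (the rewrite author's own statement) =====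
-- stated objective: alternative
-- what changed: A builds the grouped dict in one pass, appending to the group of each element's modulus; B first computes the distinct moduli in first-appearance order via dict.fromkeys and then builds each group by filtering the sequence once per distinct modulus.
import Mathlib
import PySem

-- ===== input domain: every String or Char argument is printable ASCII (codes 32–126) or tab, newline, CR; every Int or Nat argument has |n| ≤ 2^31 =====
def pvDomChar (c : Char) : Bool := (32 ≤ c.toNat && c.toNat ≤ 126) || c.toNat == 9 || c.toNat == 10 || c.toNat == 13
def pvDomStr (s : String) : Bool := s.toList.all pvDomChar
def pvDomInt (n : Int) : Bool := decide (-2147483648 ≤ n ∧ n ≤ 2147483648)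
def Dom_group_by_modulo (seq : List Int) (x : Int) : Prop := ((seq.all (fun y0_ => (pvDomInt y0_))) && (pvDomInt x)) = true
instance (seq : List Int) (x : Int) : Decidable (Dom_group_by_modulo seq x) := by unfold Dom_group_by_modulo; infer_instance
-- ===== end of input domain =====

-- B replaces A's single dict-building pass with key discovery (ordered dedup of the moduli)
-- followed by one filter per distinct modulus; objective: alternative decomposition, not speed.

-- ===== PORT A =====
def group_by_modulo (seq : List Int) (x : Int) : List (Int × List Int) :=
  (seq.foldl (fun dic num =>
      let m := PySem.Int.mod num x
      if dic.contains m then dic.modify m [] (· ++ [num])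
      else dic.insert m [num])
    PySem.Dict.empty).items

-- ===== PORT B =====
def group_by_modulo_alt (seq : List Int) (x : Int) : List (Int × List Int) :=
  let keys := PySem.List.dedup (seq.map (fun num => PySem.Int.mod num x))
  keys.map (fun m => (m, seq.filter (fun num => PySem.Int.mod num x == m)))

-- ===== PRECONDITION & SPEC =====
-- Pre_ excludes exactly x = 0, where Python's 'num % x' raises ZeroDivisionError (for nonempty seq).
def Pre_group_by_modulo (_seq : List Int) (x : Int) : Prop := x ≠ 0
instance (seq : List Int) (x : Int) : Decidable (Pre_group_by_modulo seq x) := by unfold Pre_group_by_modulo; infer_instance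
def pvWitness_group_by_modulo : List Int × Int := ([3, 1, 4, 1, 5], 2)

def Spec_group_by_modulo (seq : List Int) (x : Int) (out : List (Int × List Int)) : Prop := out = group_by_modulo_alt seq x
instance (seq : List Int) (x : Int) (out : List (Int × List Int)) : Decidable (Spec_group_by_modulo seq x out) := by unfold Spec_group_by_modulo; infer_instance

-- ===== CLAIM (what is proved, stated in full; the proofs are below) =====
def Claim_equal_group_by_modulo : Prop := ∀ (seq : List Int) (x : Int), Dom_group_by_modulo seq x → Pre_group_by_modulo seq x → Spec_group_by_modulo seq x (group_by_modulo seq x)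

-- ===== LEMMAS AND PROOFS =====

-- A's if/else step is exactly 'd[m] = d.get(m, []) + [num]'.
theorem stepA_eq_modify (x : Int) :
    (fun (dic : PySem.Dict Int (List Int)) (num : Int) =>
        let m := PySem.Int.mod num x
        if dic.contains m then dic.modify m [] (· ++ [num])
        else dic.insert m [num])
    = (fun dic num => dic.modify (PySem.Int.mod num x) [] (· ++ [num])) := by
  funext d n
  by_cases h : d.contains (PySem.Int.mod n x)
  · simp [h]
  · simp only [Bool.not_eq_true] at h
    simp [PySem.Dict.modify, PySem.Dict.getD_of_not_contains, h]

theorem group_by_modulo_eq_modify_fold (seq : List Int) (x : Int) :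
    group_by_modulo seq x
      = (seq.foldl (fun d num => d.modify (PySem.Int.mod num x) [] (· ++ [num]))
          PySem.Dict.empty).items := by
  unfold group_by_modulo
  rw [stepA_eq_modify]

theorem group_by_modulo_spec : Claim_equal_group_by_modulo := by
  intro seq x _ _
  unfold Spec_group_by_modulo group_by_modulo_alt
  rw [group_by_modulo_eq_modify_fold]
  set key : Int → Int := fun num => PySem.Int.mod num x with hkey
  set d := seq.foldl (fun d num => d.modify (key num) [] (· ++ [num])) PySem.Dict.empty with hd
  have hnd : d.keys.Nodup := by
    rw [hd]
    exact PySem.Dict.nodup_keys_foldl_modify_key seq key [] (fun _ num => (· ++ [num])) _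
      PySem.Dict.nodup_keys_empty
  have hkeys : d.keys = PySem.List.dedup (seq.map key) := by
    rw [hd, PySem.Dict.keys_foldl_modify_key]
    simp [PySem.Dict.keys_empty, PySem.Set.update_nil_left]
  have hgetD : ∀ m : Int, d.getD m [] = seq.filter (fun num => key num == m) := by
    intro m
    rw [hd]
    have hfold : seq.foldl (fun d num => d.modify (key num) [] (· ++ [num])) PySem.Dict.empty
        = (seq.map (fun n => (key n, n))).foldl (fun d p => d.modify p.1 [] (· ++ [p.2]))
            PySem.Dict.empty := by
      rw [List.foldl_map]
    rw [hfold, PySem.Dict.getD_foldl_modify_append]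
    simp [List.filter_map, Function.comp_def]
  rw [PySem.Dict.items_eq_map_keys d hnd [], hkeys]
  exact List.map_congr_left (fun m _ => by rw [hgetD m])
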